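-- pv_equiv track=rewrite | github.com/TessFerrandez/algorithms | contest/w-201/lc-m-1546-maximum-number-of-non-overlapping-subarrays.py | maxNonOverlapping1
-- ===== SOURCE A (Python) =====
-- from collections import defaultdict
-- from typing import List
--
-- def maxNonOverlapping1(nums: List[int], target: int) -> int:
--     def max_disjoint_intervals(intervals):
--         if len(intervals) == 0:
--             return 0
--
--         count = 1   # first interval is always included
--         intervals.sort(key=lambda x: x[1])
--
--         prev_end = intervals[0][1]
--
--         for i in range(1, len(intervals)):
--             curr_start = intervals[i][0]
--             curr_end = intervals[i][1]
--
--             if curr_start >= prev_end: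
--                 prev_end = curr_end
--                 count += 1
--
--         return count
--
--     prefix_sums = defaultdict(list)
--
--     current = 0
--     prefix_sums[0].append(-1)
--
--     for i, num in enumerate(nums):
--         current += num
--         prefix_sums[current].append(i)
--
--     intervals = []
--     for current in prefix_sums:
--         diff = current - target
--         if diff in prefix_sums:
--             for i in prefix_sums[current]:
--                 for j in prefix_sums[diff]:
--                     if i > j:
--                         intervals.append([j, i])
--
--     if intervals == []:
--         return 0
--
--     return max_disjoint_intervals(intervals)
-- ===== SOURCE B (Python) =====
-- from typing import List
--
--
-- def maxNonOverlapping1(nums: List[int], target: int) -> int: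
--     # One-pass greedy: keep the set of prefix sums seen since the last taken
--     # subarray; whenever current - target is in it, take a subarray and reset.
--     seen = {0}
--     current = 0
--     count = 0
--     for num in nums:
--         current += num
--         if current - target in seen:
--             count += 1
--             seen = {current}
--         else:
--             seen.add(current)
--     return count
-- ===== Notes on version B (the rewrite author's own statement) =====
-- stated objective: faster
-- what changed: A materializes every (start,end) pair of target-sum subarrays from a prefix-sum dictionary and runs an interval-scheduling greedy after sorting by end; B is a single pass that keeps the set of prefix sums seen since the last taken subarray and counts a subarray (resetting the set) whenever current-target is in it.
import Mathlib
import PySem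

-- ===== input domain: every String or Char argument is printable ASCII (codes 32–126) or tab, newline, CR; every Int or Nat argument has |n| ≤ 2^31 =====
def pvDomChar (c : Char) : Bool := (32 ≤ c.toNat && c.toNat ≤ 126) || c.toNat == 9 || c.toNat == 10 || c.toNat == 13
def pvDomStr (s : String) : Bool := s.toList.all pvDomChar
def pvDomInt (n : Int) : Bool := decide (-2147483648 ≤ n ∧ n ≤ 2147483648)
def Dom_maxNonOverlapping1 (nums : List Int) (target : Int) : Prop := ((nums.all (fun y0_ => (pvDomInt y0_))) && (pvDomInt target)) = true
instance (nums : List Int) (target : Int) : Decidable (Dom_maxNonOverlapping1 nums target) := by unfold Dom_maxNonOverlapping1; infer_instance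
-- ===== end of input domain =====

-- B replaces A's build-all-intervals-then-sort-and-greedy by a one-pass greedy over a
-- prefix-sum set that is reset after each taken subarray (faster; return values only,
-- A's Python sorts a local list in place, which no caller observes).
-- Python's 2-element interval lists [j, i] are ported as pairs (j, i).

-- ===== PORT A =====
-- helper max_disjoint_intervals of A
def pvMaxDisjoint (intervals : List (Int × Int)) : Int :=
  if PySem.List.len intervals = 0 then 0
  else
    let s := PySem.List.sorted intervals (fun x => x.2) false
    let st := (PySem.List.pyRange 1 (PySem.List.len s) 1).foldl
      (fun (st : Int × Int) i =>
        let curr_start := (PySem.List.pyGetD s i ((0 : Int), (0 : Int))).1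
        let curr_end := (PySem.List.pyGetD s i ((0 : Int), (0 : Int))).2
        if curr_start ≥ st.2 then (st.1 + 1, curr_end) else st)
      (1, (PySem.List.pyGetD s 0 ((0 : Int), (0 : Int))).2)
    st.1

def maxNonOverlapping1 (nums : List Int) (target : Int) : Int :=
  -- prefix_sums = defaultdict(list); prefix_sums[0].append(-1)
  let d0 : PySem.Dict Int (List Int) := PySem.Dict.empty.modify 0 [] (· ++ [(-1 : Int)])
  -- for i, num in enumerate(nums): current += num; prefix_sums[current].append(i)
  let st := (PySem.List.enumerate nums 0).foldl
    (fun (s : Int × PySem.Dict Int (List Int)) p =>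
      (s.1 + p.2, s.2.modify (s.1 + p.2) [] (· ++ [p.1]))) ((0 : Int), d0)
  let d := st.2
  let intervals : List (Int × Int) := d.keys.foldl
    (fun acc current =>
      let diff := current - target
      if d.contains diff then
        (d.getD current []).foldl
          (fun acc2 i =>
            (d.getD diff []).foldl
              (fun acc3 j => if i > j then acc3 ++ [(j, i)] else acc3) acc2) acc
      else acc) []
  if intervals = [] then 0 else pvMaxDisjoint intervals

-- ===== PORT B =====
def maxNonOverlapping1_alt (nums : List Int) (target : Int) : Int :=
  let st := nums.foldl
    (fun (s : Int × PySem.Set Int × Int) num =>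
      let current := s.1 + num
      if PySem.Set.contains s.2.1 (current - target) then
        (current, PySem.Set.ofList [current], s.2.2 + 1)
      else
        (current, PySem.Set.add s.2.1 current, s.2.2))
    ((0 : Int), PySem.Set.ofList [(0 : Int)], (0 : Int))
  st.2.2

-- ===== PRECONDITION & SPEC =====
def Spec_maxNonOverlapping1 (nums : List Int) (target : Int) (out : Int) : Prop := out = maxNonOverlapping1_alt nums target
instance (nums : List Int) (target : Int) (out : Int) : Decidable (Spec_maxNonOverlapping1 nums target out) := by unfold Spec_maxNonOverlapping1; infer_instance

-- ===== CLAIM (what is proved, stated in full; the proofs are below) =====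
def Claim_equal_maxNonOverlapping1 : Prop := ∀ (nums : List Int) (target : Int), Dom_maxNonOverlapping1 nums target → Spec_maxNonOverlapping1 nums target (maxNonOverlapping1 nums target)

-- ===== LEMMAS AND PROOFS =====

-- prefix values of a running sum starting at c: [c, c+x1, c+x1+x2, ...]
def pvQ (c : Int) : List Int → List Int
  | [] => [c]
  | x :: xs => c :: pvQ (c + x) xs

-- the (prefix value, python index) pairs the dict loop inserts
def pvKvs (c : Int) (k : Int) : List Int → List (Int × Int)
  | [] => []
  | x :: xs => (c + x, k) :: pvKvs (c + x) (k + 1) xs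

-- the interval-scheduling greedy of A, run over an end-sorted interval list
def pvGfold : Int → Int → List (Int × Int) → Int
  | _, cnt, [] => cnt
  | prev, cnt, x :: rest => if x.1 ≥ prev then pvGfold x.2 (cnt + 1) rest else pvGfold prev cnt rest

-- the target-sum intervals ending at python index l-1, starts ascending
def pvBlock (q : List Int) (target : Int) (l : Nat) : List (Int × Int) :=
  ((List.range l).filter (fun m => q.getD m 0 == q.getD l 0 - target)).map
    (fun (m : Nat) => ((m : Int) - 1, (l : Int) - 1))

-- all target-sum intervals, grouped by end ascending
def pvCanon (q : List Int) (target : Int) : List (Int × Int) :=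
  (List.range' 1 (q.length - 1)).flatMap (pvBlock q target)

-- one step of the one-pass greedy, phrased over prefix indices of q
def pvRefStep (q : List Int) (target : Int) (s : Nat × Int) (l : Nat) : Nat × Int :=
  if (List.range l).any (fun m => s.1 ≤ m && q.getD m 0 == q.getD l 0 - target) then (l, s.2 + 1) else s

theorem pvQ_length (c : Int) (xs : List Int) : (pvQ c xs).length = xs.length + 1 := by
  induction xs generalizing c with
  | nil => rfl
  | cons x xs ih => simp [pvQ, ih]

-- A's dict loop as a plain modify-fold over the inserted (key, value) pairs
theorem pv_dictfold (xs : List Int) (c : Int) (k : Int) (d : PySem.Dict Int (List Int)) :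
    ((PySem.List.enumerate xs k).foldl
      (fun (s : Int × PySem.Dict Int (List Int)) p =>
        (s.1 + p.2, s.2.modify (s.1 + p.2) [] (· ++ [p.1]))) (c, d)).2 =
    (pvKvs c k xs).foldl (fun d p => d.modify p.1 [] (· ++ [p.2])) d := by
  induction xs generalizing c k d with
  | nil => rfl
  | cons x xs ih =>
      simp only [PySem.List.enumerate_cons, List.foldl_cons, pvKvs]
      exact ih (c + x) (k + 1) _

-- first components of the inserted pairs are exactly the prefix values
theorem pv_kvs_fst (xs : List Int) (c : Int) (k : Int) :
    (((c, k - 1) :: pvKvs c k xs).map (·.1)) = pvQ c xs := by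
  induction xs generalizing c k with
  | nil => rfl
  | cons x xs ih =>
      have h := ih (c + x) (k + 1)
      rw [show (k : Int) + 1 - 1 = k by ring] at h
      simpa [pvKvs, pvQ] using h

-- heads of pvQ
theorem pvQ_getD_zero (c : Int) (ys : List Int) : (pvQ c ys).getD 0 0 = c := by
  cases ys <;> rfl

-- the head of pvQ
theorem pvQ_head (c : Int) (ys : List Int) : (pvQ c ys)[0]? = some c := by
  cases ys <;> rfl

-- the same, in getElem? form
theorem pvQ_getElem_zero (c : Int) (ys : List Int) : ((pvQ c ys)[0]?).getD 0 = c := by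
  cases ys <;> rfl

-- raw membership in the inserted pairs
theorem pv_kvs_mem (xs : List Int) (c : Int) (k : Int) (v j : Int) :
    ((v, j) ∈ pvKvs c k xs) ↔
      (∃ t : Nat, 1 ≤ t ∧ t ≤ xs.length ∧ (pvQ c xs).getD t 0 = v ∧ j = k - 1 + t) := by
  induction xs generalizing c k with
  | nil => simp [pvKvs, pvQ]
  | cons x xs ih =>
      simp only [pvKvs, List.mem_cons, ih (c + x) (k + 1), pvQ, List.length_cons]
      constructor
      · rintro (he | ⟨t, h1, h2, h3, h4⟩)
        · rw [Prod.mk.injEq] at he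
          exact ⟨1, by omega, by omega, by simp [List.getD_eq_getElem?_getD, pvQ_getElem_zero, he.1], by omega⟩
        · exact ⟨t + 1, by omega, by omega, by simpa using h3, by push_cast at h4 ⊢; omega⟩
      · rintro ⟨t, h1, h2, h3, h4⟩
        cases t with
        | zero => omega
        | succ t =>
            cases t with
            | zero =>
                left
                simp [List.getD_eq_getElem?_getD, pvQ_getElem_zero] at h3
                simp [h3.symm]; omega
            | succ t =>
                right
                exact ⟨t + 1, by omega, by omega, by simpa using h3, by push_cast at h4 ⊢; omega⟩

-- membership in one dict entry: python indices j whose prefix value is v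
theorem pv_kvs_filter_mem (xs : List Int) (c : Int) (k : Int) (v j : Int) :
    (j ∈ ((((c, k - 1) :: pvKvs c k xs).filter (fun p => p.1 == v)).map (·.2))) ↔
      (∃ t : Nat, t ≤ xs.length ∧ (pvQ c xs).getD t 0 = v ∧ j = k - 1 + t) := by
  have hmm : (j ∈ ((((c, k - 1) :: pvKvs c k xs).filter (fun p => p.1 == v)).map (·.2))) ↔
      (v, j) ∈ ((c, k - 1) :: pvKvs c k xs) := by
    simp only [List.mem_map, List.mem_filter, beq_iff_eq]
    constructor
    · rintro ⟨⟨a, b⟩, ⟨hm, he⟩, hj⟩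
      simp only at he hj
      subst he; subst hj; exact hm
    · intro hm; exact ⟨(v, j), ⟨hm, rfl⟩, rfl⟩
  rw [hmm, List.mem_cons, pv_kvs_mem, Prod.mk.injEq]
  constructor
  · rintro (⟨h1, h2⟩ | ⟨t, h1, h2, h3, h4⟩)
    · exact ⟨0, by omega, by simp [List.getD_eq_getElem?_getD, pvQ_getElem_zero, h1], by omega⟩
    · exact ⟨t, by omega, h3, h4⟩
  · rintro ⟨t, h1, h2, h3⟩
    cases t with
    | zero =>
        left
        simp [List.getD_eq_getElem?_getD, pvQ_getElem_zero] at h2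
        exact ⟨h2.symm, by omega⟩
    | succ t => right; exact ⟨t + 1, by omega, by omega, h2, h3⟩

-- the second components of the inserted pairs are strictly increasing
theorem pv_kvs_snd_pairwise (xs : List Int) (c : Int) (k : Int) :
    (((c, k - 1) :: pvKvs c k xs).Pairwise (fun p q => p.2 < q.2)) := by
  induction xs generalizing c k with
  | nil => simp [pvKvs]
  | cons x xs ih =>
      have h := ih (c + x) (k + 1)
      rw [show (k : Int) + 1 - 1 = k by ring] at h
      rcases List.pairwise_cons.mp h with ⟨hk, htail⟩
      refine List.pairwise_cons.mpr ⟨?_, h⟩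
      intro p hp
      rcases List.mem_cons.mp hp with hp | hp
      · subst hp; show (k : Int) - 1 < k; omega
      · have := hk p hp; simp at this ⊢; omega

-- each dict entry is duplicate-free
theorem pv_kvs_filter_nodup (xs : List Int) (c : Int) (k : Int) (v : Int) :
    (((((c, k - 1) :: pvKvs c k xs).filter (fun p => p.1 == v)).map (·.2))).Nodup := by
  have hpw := (pv_kvs_snd_pairwise xs c k).filter (fun p => p.1 == v)
  have h2 : ((((c, k - 1) :: pvKvs c k xs).filter (fun p => p.1 == v)).map (·.2)).Pairwise (· < ·) :=
    List.Pairwise.map _ (fun a b h => h) hpw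
  exact List.Pairwise.imp (fun h => ne_of_lt h) h2

-- loop shape: 'if p(x): out.extend(g(x))'
theorem pv_foldl_ite_append (l : List Int) (p : Int → Bool) (g : Int → List (Int × Int))
    (acc : List (Int × Int)) :
    l.foldl (fun acc x => if p x then acc ++ g x else acc) acc = acc ++ (l.filter p).flatMap g := by
  induction l generalizing acc with
  | nil => simp
  | cons x l ih =>
      by_cases hp : p x = true
      · simp [hp, ih, List.append_assoc]
      · simp [hp, ih]

-- the innermost loop of A's interval builder
theorem pv_foldl_if_pair (l : List Int) (i : Int) (acc : List (Int × Int)) :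
    l.foldl (fun acc3 j => if i > j then acc3 ++ [(j, i)] else acc3) acc =
      acc ++ (l.filter (fun j => decide (i > j))).map (fun j => (j, i)) := by
  induction l generalizing acc with
  | nil => simp
  | cons j l ih =>
      by_cases hij : i > j
      · simp [hij, ih, List.append_assoc]
      · simp [hij, ih]

-- greedy skips a run of intervals whose starts are all left of prev
theorem pv_gfold_skip (blk rest : List (Int × Int)) (prev cnt : Int)
    (h : ∀ x ∈ blk, x.1 < prev) :
    pvGfold prev cnt (blk ++ rest) = pvGfold prev cnt rest := by
  induction blk generalizing cnt with
  | nil => rfl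
  | cons x blk ih =>
      have hx := h x (by simp)
      simp only [List.cons_append, pvGfold, if_neg (by omega : ¬ x.1 ≥ prev)]
      exact ih cnt (fun y hy => h y (List.mem_cons_of_mem x hy))

-- greedy over a block of intervals sharing one end e: at most one is taken
theorem pv_gfold_block (blk rest : List (Int × Int)) (prev cnt e : Int)
    (h : ∀ x ∈ blk, x.2 = e ∧ x.1 < e) :
    pvGfold prev cnt (blk ++ rest) =
      if blk.any (fun x => decide (prev ≤ x.1)) then pvGfold e (cnt + 1) rest
      else pvGfold prev cnt rest := by
  induction blk generalizing prev cnt with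
  | nil => simp [pvGfold]
  | cons x blk ih =>
      have hx := h x (by simp)
      have hrest : ∀ y ∈ blk, y.2 = e ∧ y.1 < e := fun y hy => h y (List.mem_cons_of_mem x hy)
      simp only [List.cons_append, pvGfold, List.any_cons]
      by_cases hge : prev ≤ x.1
      · rw [if_pos (show x.1 ≥ prev from hge)]
        simp only [show decide (prev ≤ x.1) = true by simpa using hge, Bool.true_or, if_true]
        rw [hx.1]
        exact pv_gfold_skip blk rest e (cnt + 1) (fun y hy => by have := hrest y hy; omega)
      · rw [if_neg (show ¬ x.1 ≥ prev from hge)]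
        simp only [show decide (prev ≤ x.1) = false by simpa using hge, Bool.false_or]
        exact ih prev cnt hrest

-- in an end-sorted list whose ends are all ≥ e, the end-e intervals form the prefix
theorem pv_filter_eq_takeWhile (S : List (Int × Int)) (e : Int)
    (hp : S.Pairwise (fun a b => a.2 ≤ b.2)) (hge : ∀ x ∈ S, e ≤ x.2) :
    S.filter (fun x => x.2 == e) = S.takeWhile (fun x => x.2 == e) := by
  induction S with
  | nil => rfl
  | cons y S ih =>
      rcases List.pairwise_cons.mp hp with ⟨hy, hS⟩
      by_cases he : y.2 = e
      · simp only [List.filter_cons, List.takeWhile_cons, beq_iff_eq, he, decide_true, if_pos rfl]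
        rw [ih hS (fun x hx => hge x (by simp [hx]))]
        simp
      · have h2 := hge y (List.mem_cons_self ..)
        have hne : (y.2 == e) = false := by simpa using he
        have hnil : List.filter (fun x => x.2 == e) S = [] := by
          apply List.filter_eq_nil_iff.mpr
          intro x hx
          have h1 := hy x hx
          simp only [beq_iff_eq]
          omega
        simp [List.filter_cons, List.takeWhile_cons, hne, hnil]

-- the greedy count is the same for any two end-sorted arrangements of the intervals
theorem pv_gfold_perm (n : Nat) : ∀ (S T : List (Int × Int)), S.length ≤ n → S.Perm T →
    S.Pairwise (fun a b => a.2 ≤ b.2) → T.Pairwise (fun a b => a.2 ≤ b.2) →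
    (∀ x ∈ S, x.1 < x.2) → ∀ prev cnt, pvGfold prev cnt S = pvGfold prev cnt T := by
  induction n with
  | zero =>
      intro S T hlen hperm _ _ _ prev cnt
      have hS : S = [] := List.eq_nil_of_length_eq_zero (by omega)
      subst hS
      rw [(hperm.symm).eq_nil]
  | succ n ih =>
      intro S T hlen hperm hpS hpT hse prev cnt
      cases S with
      | nil => rw [(hperm.symm).eq_nil]
      | cons s0 S' =>
          have hmin : ∀ x ∈ s0 :: S', s0.2 ≤ x.2 := by
            intro x hx
            rcases List.mem_cons.mp hx with hx | hx
            · rw [hx]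
            · exact (List.pairwise_cons.mp hpS).1 x hx
          have hminT : ∀ x ∈ T, s0.2 ≤ x.2 := fun x hx => hmin x (hperm.symm.subset hx)
          have hseT : ∀ x ∈ T, x.1 < x.2 := fun x hx => hse x (hperm.symm.subset hx)
          have hfS := pv_filter_eq_takeWhile (s0 :: S') s0.2 hpS hmin
          have hfT := pv_filter_eq_takeWhile T s0.2 hpT hminT
          have hSdec : s0 :: S' = (s0 :: S').takeWhile (fun x => x.2 == s0.2) ++
              (s0 :: S').dropWhile (fun x => x.2 == s0.2) := List.takeWhile_append_dropWhile.symm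
          have hTdec : T = T.takeWhile (fun x => x.2 == s0.2) ++
              T.dropWhile (fun x => x.2 == s0.2) := List.takeWhile_append_dropWhile.symm
          have hblkPerm : ((s0 :: S').takeWhile (fun x => x.2 == s0.2)).Perm
              (T.takeWhile (fun x => x.2 == s0.2)) := by
            rw [← hfS, ← hfT]
            exact hperm.filter _
          have hrestPerm : ((s0 :: S').dropWhile (fun x => x.2 == s0.2)).Perm
              (T.dropWhile (fun x => x.2 == s0.2)) := by
            have h0 : (((s0 :: S').takeWhile (fun x => x.2 == s0.2)) ++
                ((s0 :: S').dropWhile (fun x => x.2 == s0.2))).Perm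
                ((T.takeWhile (fun x => x.2 == s0.2)) ++
                (T.dropWhile (fun x => x.2 == s0.2))) := by
              rw [← hSdec, ← hTdec]; exact hperm
            have h1 := h0.trans ((hblkPerm.symm).append_right _)
            exact (List.perm_append_left_iff _).mp h1
          have hblkS : ∀ x ∈ (s0 :: S').takeWhile (fun x => x.2 == s0.2),
              x.2 = s0.2 ∧ x.1 < s0.2 := by
            intro x hx
            have h1 : x.2 = s0.2 := by simpa using List.mem_takeWhile_imp hx
            have h2 : x ∈ s0 :: S' := (List.takeWhile_sublist _).subset hx
            exact ⟨h1, h1 ▸ hse x h2⟩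
          have hblkT : ∀ x ∈ T.takeWhile (fun x => x.2 == s0.2),
              x.2 = s0.2 ∧ x.1 < s0.2 := by
            intro x hx
            have h1 : x.2 = s0.2 := by simpa using List.mem_takeWhile_imp hx
            have h2 : x ∈ T := (List.takeWhile_sublist _).subset hx
            exact ⟨h1, h1 ▸ hseT x h2⟩
          have hrecur : ∀ (p c : Int),
              pvGfold p c ((s0 :: S').dropWhile (fun x => x.2 == s0.2)) =
              pvGfold p c (T.dropWhile (fun x => x.2 == s0.2)) := by
            intro p c
            apply ih _ _ ?_ hrestPerm
              (List.Pairwise.sublist (List.dropWhile_sublist _) hpS)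
              (List.Pairwise.sublist (List.dropWhile_sublist _) hpT)
              (fun x hx => hse x ((List.dropWhile_sublist _).subset hx))
            have hcons : (s0 :: S').takeWhile (fun x => x.2 == s0.2) =
                s0 :: S'.takeWhile (fun x => x.2 == s0.2) :=
              List.takeWhile_cons_of_pos (by simp)
            have hlen2 : ((s0 :: S').takeWhile (fun x => x.2 == s0.2)).length +
                ((s0 :: S').dropWhile (fun x => x.2 == s0.2)).length = S'.length + 1 := by
              rw [← List.length_append, ← hSdec]
              simp
            rw [hcons] at hlen2
            simp only [List.length_cons] at hlen2 hlen
            omega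
          rw [hSdec, hTdec,
            pv_gfold_block _ _ prev cnt s0.2 hblkS,
            pv_gfold_block _ _ prev cnt s0.2 hblkT,
            hblkPerm.any_eq]
          by_cases hb : (T.takeWhile (fun x => x.2 == s0.2)).any
              (fun x => decide (prev ≤ x.1)) = true
          · rw [if_pos hb, if_pos hb]
            exact hrecur s0.2 (cnt + 1)
          · rw [if_neg hb, if_neg hb]
            exact hrecur prev cnt

-- the interval greedy over the end-grouped interval list is the one-pass greedy over q
theorem pv_gfold_canon (q : List Int) (target : Int) (k : Nat) : ∀ (l0 m : Nat) (cnt : Int),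
    pvGfold ((m : Int) - 1) cnt ((List.range' l0 k).flatMap (pvBlock q target)) =
      ((List.range' l0 k).foldl (pvRefStep q target) (m, cnt)).2 := by
  induction k with
  | zero => intro l0 m cnt; rfl
  | succ k ih =>
      intro l0 m cnt
      rw [List.range'_succ, List.flatMap_cons, List.foldl_cons]
      rw [pv_gfold_block (pvBlock q target l0) _ ((m : Int) - 1) cnt ((l0 : Int) - 1) ?hblk]
      case hblk =>
        intro x hx
        unfold pvBlock at hx
        rcases List.mem_map.mp hx with ⟨mm, hmm, hxe⟩
        have := List.mem_range.mp (List.mem_filter.mp hmm).1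
        subst hxe
        exact ⟨rfl, by show (mm : Int) - 1 < (l0 : Int) - 1; omega⟩
      have hcond : ((pvBlock q target l0).any fun x => decide ((m : Int) - 1 ≤ x.1)) =
          ((List.range l0).any fun mm => decide (m ≤ mm) &&
            (q.getD mm 0 == q.getD l0 0 - target)) := by
        unfold pvBlock
        rw [List.any_map, List.any_filter]
        congr 1
        funext mm
        show ((q.getD mm 0 == q.getD l0 0 - target) &&
            decide ((m : Int) - 1 ≤ (mm : Int) - 1)) = _
        rw [Bool.and_comm]
        congr 1
        exact decide_eq_decide.mpr (by omega)
      rw [hcond]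
      show _ = ((List.range' (l0 + 1) k).foldl (pvRefStep q target) (pvRefStep q target (m, cnt) l0)).2
      unfold pvRefStep
      by_cases hb : ((List.range l0).any fun mm => decide (m ≤ mm) &&
          (q.getD mm 0 == q.getD l0 0 - target)) = true
      · rw [if_pos hb, if_pos hb]
        exact ih (l0 + 1) l0 (cnt + 1)
      · rw [if_neg hb, if_neg hb]
        exact ih (l0 + 1) m cnt

-- ends in a tail of the block list are bounded below
theorem pv_mem_flatMap_block (q : List Int) (target : Int) (l0 k : Nat) (x : Int × Int)
    (hx : x ∈ (List.range' l0 k).flatMap (pvBlock q target)) :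
    (l0 : Int) - 1 ≤ x.2 ∧ x.1 < x.2 := by
  rcases List.mem_flatMap.mp hx with ⟨l, hl, hxl⟩
  have hlr := List.mem_range'_1.mp hl
  unfold pvBlock at hxl
  rcases List.mem_map.mp hxl with ⟨m, hm, hxe⟩
  have hml : m < l := List.mem_range.mp (List.mem_filter.mp hm).1
  subst hxe
  constructor
  · show (l0 : Int) - 1 ≤ (l : Int) - 1
    omega
  · show (m : Int) - 1 < (l : Int) - 1
    omega

-- the block list is end-sorted
theorem pv_canon_pairwise (q : List Int) (target : Int) (l0 k : Nat) :
    ((List.range' l0 k).flatMap (pvBlock q target)).Pairwise (fun a b => a.2 ≤ b.2) := by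
  induction k generalizing l0 with
  | zero => simp
  | succ k ih =>
      rw [List.range'_succ, List.flatMap_cons]
      apply List.pairwise_append.mpr
      refine ⟨?_, ih (l0 + 1), ?_⟩
      · unfold pvBlock
        apply List.pairwise_map.mpr
        apply List.pairwise_of_forall_sublist
        intro a b _
        exact le_refl _
      · intro a ha b hb
        unfold pvBlock at ha
        rcases List.mem_map.mp ha with ⟨m, _, hae⟩
        subst hae
        have hby := (pv_mem_flatMap_block q target (l0 + 1) k b hb).1
        push_cast at hby
        show ((l0 : Int)) - 1 ≤ b.2
        omega

-- membership in the canonical interval list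
theorem pv_mem_canon (q : List Int) (target : Int) (x : Int × Int) :
    x ∈ pvCanon q target ↔
      ∃ l m : Nat, m < l ∧ l < q.length ∧ q.getD m 0 = q.getD l 0 - target ∧
        x = ((m : Int) - 1, (l : Int) - 1) := by
  unfold pvCanon pvBlock
  constructor
  · intro hx
    rcases List.mem_flatMap.mp hx with ⟨l, hl, hxl⟩
    have hlr := List.mem_range'_1.mp hl
    rcases List.mem_map.mp hxl with ⟨m, hm, hxe⟩
    rcases List.mem_filter.mp hm with ⟨hmr, hq⟩
    refine ⟨l, m, List.mem_range.mp hmr, by omega, by simpa using hq, hxe.symm⟩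
  · rintro ⟨l, m, hml, hlq, hq, hxe⟩
    apply List.mem_flatMap.mpr
    refine ⟨l, List.mem_range'_1.mpr ⟨by omega, by omega⟩, ?_⟩
    apply List.mem_map.mpr
    exact ⟨m, List.mem_filter.mpr ⟨List.mem_range.mpr hml, by simpa using hq⟩, hxe.symm⟩

-- the canonical interval list has no duplicates
theorem pv_canon_nodup (q : List Int) (target : Int) : (pvCanon q target).Nodup := by
  unfold pvCanon pvBlock
  apply List.nodup_flatMap.mpr
  constructor
  · intro l _
    apply List.Nodup.map
    · intro a b he
      simp only [Prod.mk.injEq] at he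
      omega
    · exact List.nodup_range.filter _
  · apply List.Pairwise.imp ?_ (List.pairwise_lt_range' ..)
    intro a b hab c hca hcb
    rcases List.mem_map.mp hca with ⟨m, _, hce⟩
    rcases List.mem_map.mp hcb with ⟨m2, _, hce2⟩
    rw [← hce] at hce2
    simp only [Prod.mk.injEq] at hce2
    omega

-- the loop of A's helper is pvGfold
theorem pv_fold_gfold (t : List (Int × Int)) : ∀ (cnt prev : Int),
    (t.foldl (fun (st : Int × Int) (x : Int × Int) =>
        if x.1 ≥ st.2 then (st.1 + 1, x.2) else st) (cnt, prev)).1 = pvGfold prev cnt t := by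
  induction t with
  | nil => intro cnt prev; rfl
  | cons x t ih =>
      intro cnt prev
      simp only [List.foldl_cons, pvGfold]
      by_cases hx : x.1 ≥ prev
      · rw [if_pos hx, if_pos hx]; exact ih (cnt + 1) x.2
      · rw [if_neg hx, if_neg hx]; exact ih cnt prev

-- B's one-pass fold equals the index-level one-pass greedy over q
-- A's helper equals the greedy fold over the sorted list
theorem pv_maxdisjoint_eq (intervals : List (Int × Int))
    (h : ∀ x ∈ intervals, -1 ≤ x.1) :
    pvMaxDisjoint intervals = pvGfold (-1) 0 (PySem.List.sorted intervals (fun x => x.2) false) := by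
  by_cases hnil : intervals = []
  · rw [hnil]; rfl
  · unfold pvMaxDisjoint
    rw [if_neg (by simpa [PySem.List.len_eq] using hnil)]
    cases hs : PySem.List.sorted intervals (fun x => x.2) false with
    | nil =>
        have hp := PySem.List.sorted_perm (xs := intervals) (key := fun x => x.2) (rev := false)
        rw [hs] at hp
        exact absurd hp.symm.eq_nil hnil
    | cons hd t =>
        have hmem : hd ∈ intervals := by
          rw [← PySem.List.mem_sorted (key := fun x => x.2) (rev := false)]
          rw [hs]; exact List.mem_cons_self ..
        have hfold := PySem.List.foldl_pyRange_pyGetD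
          (xs := PySem.List.sorted intervals (fun x => x.2) false) (a := 1)
          (d := ((0 : Int), (0 : Int)))
          (f := fun (st : Int × Int) (x : Int × Int) => if x.1 ≥ st.2 then (st.1 + 1, x.2) else st)
          (init := (1, (PySem.List.pyGetD (PySem.List.sorted intervals (fun x => x.2) false) 0
            ((0 : Int), (0 : Int))).2)) (by norm_num)
        rw [hs] at hfold
        dsimp only at hfold ⊢
        rw [hfold]
        simp only [Int.toNat_one, List.drop_succ_cons, List.drop_zero,
          PySem.List.pyGetD_zero_cons]
        rw [pv_fold_gfold t 1 hd.2]
        show pvGfold hd.2 1 t = pvGfold (-1) 0 (hd :: t)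
        have hge : hd.1 ≥ -1 := h hd hmem
        simp only [pvGfold, if_pos hge]
        norm_num

theorem pv_B_ref (target : Int) (ys : List Int) : ∀ (q : List Int) (a m : Nat)
    (cur cnt : Int) (seen : PySem.Set Int),
    m ≤ a →
    q.length = a + ys.length + 1 →
    q.drop a = pvQ cur ys →
    (∀ v : Int, v ∈ seen ↔ ∃ t : Nat, m ≤ t ∧ t ≤ a ∧ q.getD t 0 = v) →
    ((ys.foldl
        (fun (s : Int × PySem.Set Int × Int) num =>
          let current := s.1 + num
          if PySem.Set.contains s.2.1 (current - target) then
            (current, PySem.Set.ofList [current], s.2.2 + 1)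
          else
            (current, PySem.Set.add s.2.1 current, s.2.2)) (cur, seen, cnt)).2.2) =
      ((List.range' (a + 1) (q.length - 1 - a)).foldl (pvRefStep q target) (m, cnt)).2 := by
  induction ys with
  | nil =>
      intro q a m cur cnt seen hm hq1 hq2 hseen
      simp only [List.length_nil] at hq1
      rw [show q.length - 1 - a = 0 from by omega]
      rfl
  | cons y ys ih =>
      intro q a m cur cnt seen hm hq1 hq2 hseen
      simp only [List.length_cons] at hq1
      have hdrop : q.drop a = cur :: pvQ (cur + y) ys := by rw [hq2]; rfl
      have hdrop1 : q.drop (a + 1) = pvQ (cur + y) ys := by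
        rw [← List.drop_drop, hdrop]
        rfl
      have hga1 : q.getD (a + 1) 0 = cur + y := by
        rw [List.getD_eq_getElem?_getD,
          show q[a + 1]? = (q.drop (a + 1))[0]? from by rw [List.getElem?_drop],
          hdrop1, pvQ_head]
        rfl
      have hcond : (PySem.Set.contains seen (cur + y - target) = true) ↔
          (((List.range (a + 1)).any fun mm => decide (m ≤ mm) &&
            (q.getD mm 0 == q.getD (a + 1) 0 - target)) = true) := by
        rw [PySem.Set.contains_iff, hseen]
        simp only [List.any_eq_true, List.mem_range, Bool.and_eq_true, decide_eq_true_eq,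
          beq_iff_eq, hga1]
        constructor
        · rintro ⟨t, h1, h2, h3⟩
          exact ⟨t, by omega, h1, h3⟩
        · rintro ⟨t, h1, h2, h3⟩
          exact ⟨t, h2, by omega, h3⟩
      rw [show q.length - 1 - a = ys.length + 1 from by omega, List.range'_succ,
        List.foldl_cons, List.foldl_cons]
      show _ = ((List.range' (a + 1 + 1) ys.length).foldl (pvRefStep q target)
        (pvRefStep q target (m, cnt) (a + 1))).2
      unfold pvRefStep
      by_cases hc : PySem.Set.contains seen (cur + y - target) = true
      · rw [if_pos (hcond.mp hc)]
        simp only [hc, if_pos rfl]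
        have := ih q (a + 1) (a + 1) (cur + y) (cnt + 1) (PySem.Set.ofList [cur + y])
          (le_refl _) (by omega) hdrop1 ?_
        · rw [show q.length - 1 - (a + 1) = ys.length from by omega] at this
          exact this
        · intro v
          constructor
          · intro hv
            refine ⟨a + 1, le_refl _, le_refl _, ?_⟩
            rw [hga1]
            have : v = cur + y := by simpa [PySem.Set.mem_ofList] using hv
            omega
          · rintro ⟨t, h1, h2, h3⟩
            have ht : t = a + 1 := by omega
            subst ht
            rw [hga1] at h3
            simp only [PySem.Set.mem_ofList, List.mem_singleton]
            omega
      · rw [if_neg (fun hh => hc (hcond.mpr hh))]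
        simp only [hc, if_neg (by simpa using hc)]
        have := ih q (a + 1) m (cur + y) cnt (PySem.Set.add seen (cur + y))
          (by omega) (by omega) hdrop1 ?_
        · rw [show q.length - 1 - (a + 1) = ys.length from by omega] at this
          exact this
        · intro v
          rw [PySem.Set.mem_add]
          constructor
          · rintro (hv | hv)
            · rcases (hseen v).mp hv with ⟨t, h1, h2, h3⟩
              exact ⟨t, h1, by omega, h3⟩
            · exact ⟨a + 1, by omega, le_refl _, by rw [hga1, hv]⟩
          · rintro ⟨t, h1, h2, h3⟩
            by_cases ht : t ≤ a
            · exact Or.inl ((hseen v).mpr ⟨t, h1, ht, h3⟩)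
            · have : t = a + 1 := by omega
              subst this
              rw [hga1] at h3
              exact Or.inr h3.symm

-- ===== VERDICT (by name: the statement is the Claim_ definition above) =====
theorem maxNonOverlapping1_spec : Claim_equal_maxNonOverlapping1 := by
  intro nums target _
  unfold Spec_maxNonOverlapping1
  -- abbreviations
  have h01 : (0 : Int) - 1 = -1 := by norm_num
  -- the dictionary, as one modify-fold from empty
  have hdict : ((PySem.List.enumerate nums 0).foldl
      (fun (s : Int × PySem.Dict Int (List Int)) p =>
        (s.1 + p.2, s.2.modify (s.1 + p.2) [] (· ++ [p.1])))
      ((0 : Int), PySem.Dict.empty.modify 0 [] (· ++ [(-1 : Int)]))).2 =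
      (((0 : Int), (-1 : Int)) :: pvKvs 0 0 nums).foldl
        (fun d p => d.modify p.1 [] (· ++ [p.2])) PySem.Dict.empty := by
    rw [pv_dictfold nums 0 0]
    rfl
  set d := (((0 : Int), (-1 : Int)) :: pvKvs 0 0 nums).foldl
    (fun d p => d.modify p.1 [] (· ++ [p.2])) PySem.Dict.empty with hdDef
  set q := pvQ 0 nums with hqDef
  -- dict entry characterization
  have hGetD : ∀ v, d.getD v [] =
      (((((0 : Int), (-1 : Int)) :: pvKvs 0 0 nums).filter (fun p => p.1 == v)).map (·.2)) := by
    intro v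
    rw [hdDef, PySem.Dict.getD_foldl_modify_append]
    rfl
  have hIdx : ∀ v j, j ∈ d.getD v [] ↔
      ∃ t : Nat, t ≤ nums.length ∧ q.getD t 0 = v ∧ j = -1 + t := by
    intro v j
    rw [hGetD v]
    have h := pv_kvs_filter_mem nums 0 0 v j
    rw [h01] at h
    simpa [hqDef] using h
  have hNodupIdx : ∀ v, (d.getD v []).Nodup := by
    intro v
    rw [hGetD v]
    have h := pv_kvs_filter_nodup nums 0 0 v
    rwa [h01] at h
  -- keys characterization
  have hKeys : d.keys = PySem.Set.ofList q := by
    rw [hdDef, PySem.Dict.keys_foldl_modify_key (key := fun (p : Int × Int) => p.1)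
      (f := fun d (p : Int × Int) => (· ++ [p.2]))]
    rw [PySem.Dict.keys_empty]
    have h := pv_kvs_fst nums 0 0
    rw [h01] at h
    rw [show PySem.Set.update [] ((((0 : Int), (-1 : Int)) :: pvKvs 0 0 nums).map (fun p => p.1)) =
      PySem.Set.ofList ((((0 : Int), (-1 : Int)) :: pvKvs 0 0 nums).map (fun p => p.1)) from rfl]
    rw [show (((0 : Int), (-1 : Int)) :: pvKvs 0 0 nums).map (fun p => p.1) = q from h]
  have hND : d.keys.Nodup := by
    rw [hKeys]; exact PySem.Set.nodup_ofList q
  have hMemQ : ∀ v : Int, v ∈ q ↔ ∃ l : Nat, l < q.length ∧ q.getD l 0 = v := by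
    intro v
    constructor
    · intro hv
      rcases List.mem_iff_getElem.mp hv with ⟨l, hl, he⟩
      exact ⟨l, hl, by rw [List.getD_eq_getElem?_getD, List.getElem?_eq_getElem hl, he]; rfl⟩
    · rintro ⟨l, hl, he⟩
      rw [List.getD_eq_getElem?_getD, List.getElem?_eq_getElem hl] at he
      rw [← he]
      exact List.getElem_mem hl
  have hContains : ∀ v, d.contains v = true ↔ ∃ l : Nat, l < q.length ∧ q.getD l 0 = v := by
    intro v
    rw [PySem.Dict.contains_iff_mem_keys, hKeys, PySem.Set.mem_ofList]
    exact hMemQ v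
  -- the interval list, closed form
  have hlenq : q.length = nums.length + 1 := pvQ_length 0 nums
  have hmid : ∀ (cur : Int) (acc : List (Int × Int)),
      ((d.getD cur []).foldl (fun acc2 i =>
        (d.getD (cur - target) []).foldl
          (fun acc3 j => if i > j then acc3 ++ [(j, i)] else acc3) acc2) acc) =
      acc ++ (d.getD cur []).flatMap (fun i =>
        ((d.getD (cur - target) []).filter (fun j => decide (i > j))).map (fun j => (j, i))) := by
    intro cur acc
    simp only [pv_foldl_if_pair]
    rw [PySem.List.foldl_append_eq_flatMap]
  have hintv : (d.keys.foldl (fun acc current =>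
        if d.contains (current - target) then
          (d.getD current []).foldl (fun acc2 i =>
            (d.getD (current - target) []).foldl
              (fun acc3 j => if i > j then acc3 ++ [(j, i)] else acc3) acc2) acc
        else acc) []) =
      ((d.keys.filter (fun cur => d.contains (cur - target))).flatMap (fun cur =>
        (d.getD cur []).flatMap (fun i =>
          ((d.getD (cur - target) []).filter (fun j => decide (i > j))).map (fun j => (j, i))))) := by
    have h1 := PySem.List.foldl_congr_mem d.keys
      (fun acc current => if d.contains (current - target) then
        (d.getD current []).foldl (fun acc2 i =>
          (d.getD (current - target) []).foldl
            (fun acc3 j => if i > j then acc3 ++ [(j, i)] else acc3) acc2) acc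
        else acc)
      (fun acc cur => if d.contains (cur - target) then
        acc ++ (d.getD cur []).flatMap (fun i =>
          ((d.getD (cur - target) []).filter (fun j => decide (i > j))).map (fun j => (j, i)))
        else acc)
      []
      (fun acc x _ => by
        beta_reduce
        by_cases hc : d.contains (x - target) = true
        · rw [if_pos hc, if_pos hc, hmid]
        · rw [if_neg hc, if_neg hc])
    rw [h1]
    rw [pv_foldl_ite_append, List.nil_append]
  set I := ((d.keys.filter (fun cur => d.contains (cur - target))).flatMap (fun cur =>
      (d.getD cur []).flatMap (fun i =>
        ((d.getD (cur - target) []).filter (fun j => decide (i > j))).map (fun j => (j, i))))) with hIDef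
  have hmemI : ∀ x : Int × Int, x ∈ I ↔
      ∃ l m : Nat, m < l ∧ l < q.length ∧ q.getD m 0 = q.getD l 0 - target ∧
        x = ((m : Int) - 1, (l : Int) - 1) := by
    intro x
    rw [hIDef]
    simp only [List.mem_flatMap, List.mem_filter, List.mem_map]
    constructor
    · rintro ⟨cur, ⟨hcurk, hcont⟩, i, hi, j, ⟨hj, hij⟩, hxe⟩
      rcases (hIdx cur i).mp hi with ⟨l, hl, hql, hie⟩
      rcases (hIdx (cur - target) j).mp hj with ⟨m, hm, hqm, hje⟩
      have hgt : i > j := of_decide_eq_true hij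
      refine ⟨l, m, by omega, by omega, by rw [hqm, hql], ?_⟩
      rw [← hxe]
      rw [Prod.mk.injEq]
      constructor <;> omega
    · rintro ⟨l, m, hml, hlq, hq, hxe⟩
      refine ⟨q.getD l 0, ⟨?_, ?_⟩, (l : Int) - 1, ?_, (m : Int) - 1, ⟨?_, ?_⟩, ?_⟩
      · rw [hKeys, PySem.Set.mem_ofList]
        exact (hMemQ _).mpr ⟨l, hlq, rfl⟩
      · exact (hContains _).mpr ⟨m, by omega, hq⟩
      · exact (hIdx _ _).mpr ⟨l, by omega, rfl, by omega⟩
      · exact (hIdx _ _).mpr ⟨m, by omega, hq, by omega⟩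
      · exact decide_eq_true (by omega)
      · rw [hxe]
  have hnodupI : I.Nodup := by
    rw [hIDef]
    apply List.nodup_flatMap.mpr
    constructor
    · intro cur _
      apply List.nodup_flatMap.mpr
      constructor
      · intro i _
        apply List.Nodup.map
        · intro a b he
          exact (Prod.ext_iff.mp he).1
        · exact (hNodupIdx _).filter _
      · apply List.Pairwise.imp ?_ (hNodupIdx cur)
        intro i i2 hne c hc hc2
        rcases List.mem_map.mp hc with ⟨j, _, hje⟩
        rcases List.mem_map.mp hc2 with ⟨j2, _, hje2⟩
        rw [← hje] at hje2
        exact hne ((Prod.ext_iff.mp hje2).2).symm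
    · apply List.Pairwise.imp ?_ ((hND.filter _))
      intro v v2 hne c hc hc2
      rcases List.mem_flatMap.mp hc with ⟨i, hi, hci⟩
      rcases List.mem_flatMap.mp hc2 with ⟨i2, hi2, hci2⟩
      rcases List.mem_map.mp hci with ⟨j, _, hje⟩
      rcases List.mem_map.mp hci2 with ⟨j2, _, hje2⟩
      rcases (hIdx v i).mp hi with ⟨l, _, hql, hie⟩
      rcases (hIdx v2 i2).mp hi2 with ⟨l2, _, hql2, hie2⟩
      have hii : i = i2 := by
        have h1 : c.2 = i := by rw [← hje]
        have h2 : c.2 = i2 := by rw [← hje2]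
        omega
      have hll : l = l2 := by omega
      exact hne (by rw [← hql, ← hql2, hll])
  have hpermI : I.Perm (pvCanon q target) :=
    (List.perm_ext_iff_of_nodup hnodupI (pv_canon_nodup q target)).mpr
      (fun a => (hmemI a).trans (pv_mem_canon q target a).symm)
  -- A's result
  have hA : maxNonOverlapping1 nums target =
      pvGfold (-1) 0 (PySem.List.sorted I (fun x => x.2) false) := by
    unfold maxNonOverlapping1
    dsimp only
    rw [hdict, hintv]
    by_cases hIe : I = []
    · rw [if_pos hIe, hIe]
      rfl
    · rw [if_neg hIe]
      apply pv_maxdisjoint_eq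
      intro x hx
      rcases (hmemI x).mp hx with ⟨l, m, _, _, _, hxe⟩
      subst hxe
      show -1 ≤ (m : Int) - 1
      omega
  -- sorted I ~ canon, both end-sorted
  have hsortperm : (PySem.List.sorted I (fun x => x.2) false).Perm (pvCanon q target) :=
    (PySem.List.sorted_perm ..).trans hpermI
  have hgsort : pvGfold (-1) 0 (PySem.List.sorted I (fun x => x.2) false) =
      pvGfold (-1) 0 (pvCanon q target) := by
    apply pv_gfold_perm (PySem.List.sorted I (fun x => x.2) false).length _ _ (le_refl _)
      hsortperm (PySem.List.sorted_pairwise ..) ?_ ?_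
    · show (pvCanon q target).Pairwise (fun a b => a.2 ≤ b.2)
      exact pv_canon_pairwise q target 1 (q.length - 1)
    · intro x hx
      have hxI : x ∈ I := by rw [PySem.List.mem_sorted] at hx; exact hx
      rcases (hmemI x).mp hxI with ⟨l, m, hml, _, _, hxe⟩
      subst hxe
      show (m : Int) - 1 < (l : Int) - 1
      omega
  -- canon greedy = index greedy
  have hcanon : pvGfold (-1) 0 (pvCanon q target) =
      ((List.range' 1 (q.length - 1)).foldl (pvRefStep q target) (0, 0)).2 := by
    have h := pv_gfold_canon q target (q.length - 1) 1 0 0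
    rw [show ((0 : Nat) : Int) - 1 = -1 from by norm_num] at h
    exact h
  -- B's result
  have hB : maxNonOverlapping1_alt nums target =
      ((List.range' 1 (q.length - 1)).foldl (pvRefStep q target) (0, 0)).2 := by
    have h := pv_B_ref target nums q 0 0 0 0 (PySem.Set.ofList [(0 : Int)])
      (le_refl 0) (by omega) (by rw [List.drop_zero]) ?_
    · rw [show q.length - 1 - 0 = q.length - 1 from by omega] at h
      exact h
    · intro v
      constructor
      · intro hv
        have hv0 : v = 0 := by simpa [PySem.Set.mem_ofList] using hv
        refine ⟨0, le_refl _, le_refl _, ?_⟩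
        rw [hqDef, pvQ_getD_zero, hv0]
      · rintro ⟨t, _, h2, h3⟩
        have ht : t = 0 := by omega
        subst ht
        rw [hqDef, pvQ_getD_zero] at h3
        simp [PySem.Set.mem_ofList, ← h3]
  rw [hA, hgsort, hcanon, hB]
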